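-- pv_equiv track=rewrite | github.com/NenausnikovKV/personal_library | NLP/processing_plan_text.py | correct_register
-- ===== SOURCE A (Python) =====
-- def correct_register(text):
--     # все слова в верзнем регистре переводятся в верхний регистр первая буква слова
--     lines = text.split("\n")
--     new_lines = []
--     for line in lines:
--         words = []
--         for word in line.split(" "):
--             if len(word)>1:
--                 word = word[0] + word[1:].lower()
--             words.append(word)
--         new_lines.append(" ".join(words))
--     text = "\n".join(new_lines)
--     return text
-- ===== SOURCE B (Python) =====
-- def correct_register(text):
--     out = []
--     new_word = True
--     for ch in text:
--         if ch == ' ' or ch == '\n':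
--             out.append(ch)
--             new_word = True
--         elif new_word:
--             out.append(ch)
--             new_word = False
--         else:
--             out.append(ch.lower())
--             new_word = False
--     return ''.join(out)
-- ===== Notes on version B (the rewrite author's own statement) =====
-- stated objective: alternative
-- what changed: Replaced the split-on-newline / split-on-space / per-word slice-and-lower / double join pipeline by a single left-to-right character scan with a new_word flag that keeps the first character of each word and lowercases the rest.
import Mathlib
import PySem

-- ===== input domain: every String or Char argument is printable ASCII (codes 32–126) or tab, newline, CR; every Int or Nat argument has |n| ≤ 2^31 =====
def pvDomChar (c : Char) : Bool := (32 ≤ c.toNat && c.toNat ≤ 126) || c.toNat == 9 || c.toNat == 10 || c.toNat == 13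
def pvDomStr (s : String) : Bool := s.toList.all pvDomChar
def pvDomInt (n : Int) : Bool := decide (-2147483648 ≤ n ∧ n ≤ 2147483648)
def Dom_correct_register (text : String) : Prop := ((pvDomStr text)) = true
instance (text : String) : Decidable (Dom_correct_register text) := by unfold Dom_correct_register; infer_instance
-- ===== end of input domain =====

-- B replaces A's split/split/join word pipeline by a single stateful character scan; same output, proved equal on all strings.


-- ===== PORT A =====
-- word[0] + word[1:].lower() guarded by len(word) > 1 (word[0] via pyGet?, word[1:] via slice)
def pvFixWord (w : List Char) : List Char :=
  if 1 < w.length then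
    match PySem.List.pyGet? w 0 with
    | some c => [c] ++ PySem.Chars.lower (PySem.List.slice w (some 1) none)
    | none => w
  else w

-- inner loop: for word in line.split(" "): words.append(...)
def pvProcLine (line : List Char) : List Char :=
  PySem.Chars.join [' ']
    ((PySem.Chars.splitOn line [' ']).foldl (fun words word => words ++ [pvFixWord word]) [])

def correct_register (text : String) : String :=
  let lines := PySem.Chars.splitOn text.toList ['\n']
  let new_lines := lines.foldl (fun nl line => nl ++ [pvProcLine line]) []
  String.ofList (PySem.Chars.join ['\n'] new_lines)

-- ===== PORT B =====
-- single pass over the characters with a (out, new_word) accumulator; ch.lower() on one char is lowerChar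
def correct_register_alt (text : String) : String :=
  let st := text.toList.foldl
    (fun (st : List Char × Bool) ch =>
      if ch = ' ' ∨ ch = '\n' then (st.1 ++ [ch], true)
      else if st.2 then (st.1 ++ [ch], false)
      else (st.1 ++ [PySem.Chars.lowerChar ch], false))
    ([], true)
  String.ofList st.1

-- ===== PRECONDITION & SPEC =====
def Spec_correct_register (text : String) (out : String) : Prop := out = correct_register_alt text
instance (text : String) (out : String) : Decidable (Spec_correct_register text out) := by unfold Spec_correct_register; infer_instance

-- ===== CLAIM (what is proved, stated in full; the proofs are below) =====
def Claim_equal_correct_register : Prop := ∀ (text : String), Dom_correct_register text → Spec_correct_register text (correct_register text)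

-- ===== LEMMAS AND PROOFS =====

-- simple structural recursion computing Python's s.split(c) for a one-char separator
def pvSplit (c : Char) : List Char → List (List Char)
  | [] => [[]]
  | a :: r => if a = c then [] :: pvSplit c r
              else ((pvSplit c r).headI.cons a) :: (pvSplit c r).tail

-- B's scan as a plain recursion (the foldl above equals it)
def pvScan (low : Char → Char) : Bool → List Char → List Char
  | _, [] => []
  | b, ch :: r =>
    if ch = ' ' ∨ ch = '\n' then ch :: pvScan low true r
    else if b then ch :: pvScan low false r
    else low ch :: pvScan low false r

-- word-level scan: only ' ' is a boundary
def pvWScan (low : Char → Char) : Bool → List Char → List Char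
  | _, [] => []
  | b, ch :: r =>
    if ch = ' ' then ch :: pvWScan low true r
    else if b then ch :: pvWScan low false r
    else low ch :: pvWScan low false r

def pvWordFix (low : Char → Char) : List Char → List Char
  | [] => []
  | a :: t => a :: t.map low

def pvFixB (low : Char → Char) (b : Bool) (w : List Char) : List Char :=
  if b then pvWordFix low w else w.map low

lemma pvSplit_ne_nil (c : Char) (l : List Char) : pvSplit c l ≠ [] := by
  cases l with
  | nil => simp [pvSplit]
  | cons a r => simp only [pvSplit]; split_ifs <;> simp

lemma pvSplitOn_go_spec (c : Char) :
    ∀ (fuel : Nat) (l cur : List Char) (acc : List (List Char)), l.length ≤ fuel →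
      PySem.Chars.splitOn.go [c] fuel l cur acc
        = acc.reverse ++ (pvSplit c l).modifyHead (cur.reverse ++ ·) := by
  intro fuel
  induction fuel with
  | zero =>
      intro l cur acc hl
      have : l = [] := by
        cases l with
        | nil => rfl
        | cons a r => simp at hl
      subst this
      simp [PySem.Chars.splitOn.go, pvSplit]
  | succ f ih =>
      intro l cur acc hl
      cases l with
      | nil => simp [PySem.Chars.splitOn.go, pvSplit]
      | cons a r =>
          by_cases hac : a = c
          · subst hac
            have hpre : List.isPrefixOf [a] (a :: r) = true := by
              simp [List.isPrefixOf]
            rw [PySem.Chars.splitOn.go]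
            simp only [hpre, if_true, List.length_cons, List.length_nil, List.drop_succ_cons, List.drop_zero]
            rw [ih r [] ((cur.reverse) :: acc) (by simpa using Nat.le_of_succ_le_succ hl)]
            simp [pvSplit]
            cases hm : pvSplit a r with
            | nil => exact absurd hm (pvSplit_ne_nil a r)
            | cons h' t' => simp
          · have hpre : List.isPrefixOf [c] (a :: r) = false := by
              simp [List.isPrefixOf]
              exact fun hh => absurd hh.symm hac
            rw [PySem.Chars.splitOn.go]
            rw [hpre]
            simp only [Bool.false_eq_true, if_false]
            rw [ih r (a :: cur) acc (by simpa using Nat.le_of_succ_le_succ hl)]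
            simp [pvSplit, hac]
            cases hm : pvSplit c r with
            | nil => exact absurd hm (pvSplit_ne_nil c r)
            | cons h' t' => simp

lemma pvSplitOn_eq (c : Char) (l : List Char) :
    PySem.Chars.splitOn l [c] = pvSplit c l := by
  unfold PySem.Chars.splitOn
  rw [pvSplitOn_go_spec c (l.length + 1) l [] [] (by omega)]
  cases hm : pvSplit c l with
  | nil => exact absurd hm (pvSplit_ne_nil c l)
  | cons h' t' => simp

lemma pvFixWord_eq (w : List Char) : pvFixWord w = pvWordFix PySem.Chars.lowerChar w := by
  cases w with
  | nil => simp [pvFixWord, pvWordFix]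
  | cons a t =>
      cases t with
      | nil => simp [pvFixWord, pvWordFix]
      | cons b t' =>
          have hnn : (0 : Int) ≤ (t'.length : Int) + 1 := by positivity
          simp [pvFixWord, pvWordFix, PySem.List.pyGet?, PySem.List.pyIdx?, PySem.List.slice_from_one,
                PySem.Chars.lower, hnn]

lemma pvFoldl_append_map {α β : Type} (f : α → β) :
    ∀ (l : List α) (acc : List β), l.foldl (fun a x => a ++ [f x]) acc = acc ++ l.map f := by
  intro l
  induction l with
  | nil => simp
  | cons a r ih => intro acc; simp [ih]

lemma pvIntercalate_cons {α : Type} (sep : List α) :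
    ∀ (t : List (List α)) (h : List α),
      sep.intercalate (h :: t) = h ++ (t.map (fun x => sep ++ x)).flatten := by
  intro t
  induction t with
  | nil => intro h; simp [List.intercalate]
  | cons h2 t' ih =>
      intro h
      have step : sep.intercalate (h :: h2 :: t') = h ++ sep ++ sep.intercalate (h2 :: t') := by
        simp [List.intercalate, List.intersperse]
      rw [step, ih h2]
      simp

lemma pvWScan_split (low : Char → Char) :
    ∀ (l : List Char) (b : Bool) (h : List Char) (t : List (List Char)),
      pvSplit ' ' l = h :: t →
      pvWScan low b l
        = pvFixB low b h ++ (t.map (fun ck => ' ' :: pvWordFix low ck)).flatten := by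
  intro l
  induction l with
  | nil =>
      intro b h t hm
      simp [pvSplit] at hm
      obtain ⟨rfl, rfl⟩ := hm
      cases b <;> simp [pvWScan, pvFixB, pvWordFix]
  | cons a r ih =>
      intro b h t hm
      by_cases ha : a = ' '
      · subst ha
        simp [pvSplit] at hm
        obtain ⟨rfl, rfl⟩ := hm
        cases hr : pvSplit ' ' r with
        | nil => exact absurd hr (pvSplit_ne_nil _ r)
        | cons h' t' =>
            rw [pvWScan]
            rw [if_pos rfl]
            rw [ih true h' t' hr]
            cases b <;> simp [pvFixB, pvWordFix]
      · cases hr : pvSplit ' ' r with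
        | nil => exact absurd hr (pvSplit_ne_nil _ r)
        | cons h' t' =>
            simp only [pvSplit, hr, if_neg ha] at hm
            obtain ⟨rfl, rfl⟩ := hm
            rw [pvWScan]
            rw [if_neg ha]
            rw [ih false h' t' hr]
            cases b <;> simp [pvFixB, pvWordFix, List.headI]

lemma pvScan_split (low : Char → Char) :
    ∀ (l : List Char) (b : Bool) (h : List Char) (t : List (List Char)),
      pvSplit '\n' l = h :: t →
      pvScan low b l
        = pvWScan low b h ++ (t.map (fun ck => '\n' :: pvWScan low true ck)).flatten := by
  intro l
  induction l with
  | nil =>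
      intro b h t hm
      simp [pvSplit] at hm
      obtain ⟨rfl, rfl⟩ := hm
      simp [pvScan, pvWScan]
  | cons a r ih =>
      intro b h t hm
      by_cases ha : a = '\n'
      · subst ha
        simp [pvSplit] at hm
        obtain ⟨rfl, rfl⟩ := hm
        cases hr : pvSplit '\n' r with
        | nil => exact absurd hr (pvSplit_ne_nil _ r)
        | cons h' t' =>
            rw [pvScan]
            rw [if_pos (Or.inr rfl)]
            rw [ih true h' t' hr]
            simp [pvWScan]
      · cases hr : pvSplit '\n' r with
        | nil => exact absurd hr (pvSplit_ne_nil _ r)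
        | cons h' t' =>
            simp only [pvSplit, hr, if_neg ha] at hm
            obtain ⟨rfl, rfl⟩ := hm
            by_cases hsp : a = ' '
            · subst hsp
              rw [pvScan, pvWScan]
              rw [if_pos (Or.inl rfl), if_pos rfl]
              rw [ih true h' t' hr]
              simp [List.headI]
            · rw [pvScan, pvWScan]
              rw [if_neg (by simp [hsp, ha]), if_neg hsp]
              rw [ih false h' t' hr]
              cases b <;> simp [List.headI]

lemma pvFoldl_scan :
    ∀ (l : List Char) (acc : List Char) (b : Bool),
      (l.foldl
        (fun (st : List Char × Bool) ch =>
          if ch = ' ' ∨ ch = '\n' then (st.1 ++ [ch], true)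
          else if st.2 then (st.1 ++ [ch], false)
          else (st.1 ++ [PySem.Chars.lowerChar ch], false))
        (acc, b)).1 = acc ++ pvScan PySem.Chars.lowerChar b l := by
  intro l
  induction l with
  | nil => intro acc b; simp [pvScan]
  | cons ch r ih =>
      intro acc b
      by_cases h1 : ch = ' ' ∨ ch = '\n'
      · simp [pvScan, h1, ih]
      · cases b <;> simp [pvScan, h1, ih]

lemma pvProcLine_eq (line : List Char) :
    pvProcLine line = pvWScan PySem.Chars.lowerChar true line := by
  unfold pvProcLine
  rw [pvSplitOn_eq, pvFoldl_append_map]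
  cases hm : pvSplit ' ' line with
  | nil => exact absurd hm (pvSplit_ne_nil _ line)
  | cons h t =>
      rw [pvWScan_split PySem.Chars.lowerChar line true h t hm]
      simp [PySem.Chars.join, pvIntercalate_cons, pvFixWord_eq, pvFixB, List.map_map,
            Function.comp_def]

-- ===== VERDICT (by name: the statement is the Claim_ definition above) =====
theorem correct_register_spec : Claim_equal_correct_register := by
  unfold Claim_equal_correct_register
  intro text _
  unfold Spec_correct_register
  unfold correct_register correct_register_alt
  dsimp only
  rw [pvFoldl_scan text.toList [] true]
  rw [pvSplitOn_eq, pvFoldl_append_map]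
  cases hm : pvSplit '\n' text.toList with
  | nil => exact absurd hm (pvSplit_ne_nil _ text.toList)
  | cons H T =>
      rw [pvScan_split PySem.Chars.lowerChar text.toList true H T hm]
      simp [PySem.Chars.join, pvIntercalate_cons, pvProcLine_eq, List.map_map, Function.comp_def]
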